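-- pv_equiv track=rewrite | github.com/VickythoEros/algorithme_optimisation_probleme_8_reines | Algo recuit simule/recuit.py | conflits
-- ===== SOURCE A (Python) =====
-- def conflits(T):
--     """
--     Attend en parametre un tableau des emplacements des 8 REINES
--     dans la matrice
--     :param T:
--     :return: S
--     """
--     S = 0
--     n = len(T)
--     for i in range(n):
--         m = 0
--         for j in range(n):
--             if T[i] == T[j] or abs(i - j) == abs(T[i] - T[j]):
--                 m += 1
--         S += m - 1
--     return S
-- ===== SOURCE B (Python) =====
-- def _counter(xs):
--     c = {}
--     for x in xs:
--         c[x] = c.get(x, 0) + 1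
--     return c
--
--
-- def conflits(T):
--     rows = _counter(T)
--     diag = _counter([i - v for i, v in enumerate(T)])
--     anti = _counter([i + v for i, v in enumerate(T)])
--     return sum(rows[v] + diag[i - v] + anti[i + v] - 3 for i, v in enumerate(T))
-- ===== Notes on version B (the rewrite author's own statement) =====
-- stated objective: faster
-- what changed: Replaced the O(n^2) all-pairs double loop by three hash-map counters over rows, diagonals and anti-diagonals built in O(n), summing per-queen group sizes minus 3.
import Mathlib
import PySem

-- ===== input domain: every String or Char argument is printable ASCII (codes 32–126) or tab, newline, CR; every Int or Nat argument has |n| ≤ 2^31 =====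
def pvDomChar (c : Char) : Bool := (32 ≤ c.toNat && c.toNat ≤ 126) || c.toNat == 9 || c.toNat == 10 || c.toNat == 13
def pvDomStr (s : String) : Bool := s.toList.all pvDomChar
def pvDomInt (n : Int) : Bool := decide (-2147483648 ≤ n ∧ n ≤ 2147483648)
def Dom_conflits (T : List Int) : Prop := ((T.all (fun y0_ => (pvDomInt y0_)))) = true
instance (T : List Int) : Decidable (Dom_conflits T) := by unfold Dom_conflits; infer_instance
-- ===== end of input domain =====

-- B replaces A's all-pairs double loop by three counters (row / diagonal / anti-diagonal), summing per-queen group sizes.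

-- ===== PORT A =====
def conflits (T : List Int) : Int :=
  let n : Int := T.length
  (PySem.List.pyRange 0 n 1).foldl (fun S i =>
    let m : Int := (PySem.List.pyRange 0 n 1).foldl (fun m j =>
      if PySem.List.pyGetD T i 0 = PySem.List.pyGetD T j 0 ∨
         (i - j).natAbs = (PySem.List.pyGetD T i 0 - PySem.List.pyGetD T j 0).natAbs
      then m + 1 else m) 0
    S + (m - 1)) 0

-- ===== PORT B =====
-- port of Source B's _counter: c[x] = c.get(x, 0) + 1 in a loop
def pvCounter (xs : List Int) : PySem.Dict Int Int :=
  xs.foldl (fun c x => c.insert x (c.getD x 0 + 1)) PySem.Dict.empty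

def conflits_alt (T : List Int) : Int :=
  let rows := pvCounter T
  let diag := pvCounter ((PySem.List.enumerate T 0).map (fun p => p.1 - p.2))
  let anti := pvCounter ((PySem.List.enumerate T 0).map (fun p => p.1 + p.2))
  ((PySem.List.enumerate T 0).map (fun p =>
    rows.getD p.2 0 + diag.getD (p.1 - p.2) 0 + anti.getD (p.1 + p.2) 0 - 3)).sum

-- ===== PRECONDITION & SPEC =====
def Spec_conflits (T : List Int) (out : Int) : Prop := out = conflits_alt T
instance (T : List Int) (out : Int) : Decidable (Spec_conflits T out) := by unfold Spec_conflits; infer_instance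

-- ===== CLAIM (what is proved, stated in full; the proofs are below) =====
def Claim_equal_conflits : Prop := ∀ (T : List Int), Dom_conflits T → Spec_conflits T (conflits T)

-- ===== LEMMAS AND PROOFS =====

-- A's inner loop is a countP
lemma pv_foldl_if_count (l : List Int) (p : Int → Prop) [DecidablePred p] (s : Int) :
    l.foldl (fun m j => if p j then m + 1 else m) s = s + l.countP (fun j => decide (p j)) := by
  induction l generalizing s with
  | nil => simp
  | cons x xs ih => by_cases hx : p x <;> simp [hx, ih] <;> try omega

-- inclusion–exclusion over any list of column indices: the conflict condition counts exactly
-- row + diagonal + anti-diagonal matches, except that j = i is counted three times instead of once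
lemma pv_per (T : List Int) (i : Int) (js : List Int) :
    js.countP (fun j => decide (PySem.List.pyGetD T i 0 = PySem.List.pyGetD T j 0 ∨
        (i - j).natAbs = (PySem.List.pyGetD T i 0 - PySem.List.pyGetD T j 0).natAbs)) + 2 * js.count i
      = js.countP (fun j => decide (PySem.List.pyGetD T i 0 = PySem.List.pyGetD T j 0))
      + js.countP (fun j => decide (i - PySem.List.pyGetD T i 0 = j - PySem.List.pyGetD T j 0))
      + js.countP (fun j => decide (i + PySem.List.pyGetD T i 0 = j + PySem.List.pyGetD T j 0)) := by
  induction js with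
  | nil => simp
  | cons x xs ih =>
    simp only [List.countP_cons, List.count_cons, decide_eq_true_eq, beq_iff_eq]
    have key : (if (PySem.List.pyGetD T i 0 = PySem.List.pyGetD T x 0 ∨
          (i - x).natAbs = (PySem.List.pyGetD T i 0 - PySem.List.pyGetD T x 0).natAbs)
          then (1:Nat) else 0) + 2 * (if x = i then 1 else 0)
        = (if PySem.List.pyGetD T i 0 = PySem.List.pyGetD T x 0 then 1 else 0)
        + (if i - PySem.List.pyGetD T i 0 = x - PySem.List.pyGetD T x 0 then 1 else 0)
        + (if i + PySem.List.pyGetD T i 0 = x + PySem.List.pyGetD T x 0 then 1 else 0) := by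
      by_cases hx : x = i
      · subst hx; simp
      · rcases eq_or_ne ((i - x).natAbs) ((PySem.List.pyGetD T i 0 - PySem.List.pyGetD T x 0).natAbs) with hd | hd <;>
        split_ifs <;> omega
    omega

-- counting an element through a map
lemma pv_count_map (l : List Int) (f : Int → Int) (x : Int) :
    (l.map f).count x = l.countP (fun a => decide (x = f a)) := by
  induction l with
  | nil => simp
  | cons y ys ih =>
    simp only [List.map_cons, List.count_cons, List.countP_cons, ih, beq_iff_eq, decide_eq_true_eq]
    by_cases h : x = f y
    · simp [h]
    · simp [h, Ne.symm h]

lemma pv_counter_eq (xs : List Int) : pvCounter xs = PySem.Dict.counter xs :=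
  PySem.Dict.foldl_insert_getD_add_one_eq_counter xs

-- counting a value of T is counting matching indices
lemma pv_count_T (T : List Int) (v : Int) :
    T.count v = (PySem.List.pyRange 0 (PySem.List.len T) 1).countP
      (fun j => decide (v = PySem.List.pyGetD T j 0)) := by
  conv_lhs => rw [← PySem.List.map_pyGetD_pyRange_zero T 0]
  exact pv_count_map _ _ _

theorem conflits_eq_alt (T : List Int) : conflits T = conflits_alt T := by
  unfold conflits conflits_alt
  simp only [pv_counter_eq, PySem.List.foldl_add]
  rw [PySem.List.enumerate_eq_map_pyRange T (0:Int)]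
  simp only [List.map_map, Function.comp_def]
  rw [zero_add]
  refine congrArg List.sum (List.map_congr_left ?_)
  intro i hi
  have hmem : 0 ≤ i ∧ i < PySem.List.len T := PySem.List.mem_pyRange_one.mp hi
  rw [pv_foldl_if_count, zero_add]
  rw [PySem.Dict.getD_counter, PySem.Dict.getD_counter, PySem.Dict.getD_counter]
  rw [pv_count_T, pv_count_map, pv_count_map]
  have hcnt : (PySem.List.pyRange 0 (PySem.List.len T) 1).count i = 1 :=
    List.count_eq_one_of_mem (PySem.List.nodup_pyRange_one _ _) hi
  have hper := pv_per T i (PySem.List.pyRange 0 (PySem.List.len T) 1)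
  rw [hcnt] at hper
  simp only [PySem.List.len_eq] at hper ⊢
  omega

-- ===== VERDICT (by name: the statement is the Claim_ definition above) =====
theorem conflits_spec : Claim_equal_conflits := by
  intro T _
  unfold Spec_conflits
  exact conflits_eq_alt T
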